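-- pv_equiv track=rewrite | github.com/Thor-the-Dwarf/FI_Skilltrainer | backend/QuizMaster/scripts/import_pv3wiso_quiz_to_db.py | concept_parent_ref
-- ===== SOURCE A (Python) =====
-- ALT_VARIANT_SUFFIXES = ("::alt1", "::alt2", "::alt3", "::alt4", "::alt5", "::alt6", "::alt7", "::alt8")
--
-- DERIVED_CONCEPT_SUFFIXES = (
--     "::number_choice",
--     "::ordering_choice",
--     "::table_fill_yes_no",
-- )
--
-- def concept_parent_ref(source_ref: str) -> str:
--     parent_ref = source_ref
--     trimmed = True
--     while trimmed:
--         trimmed = False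
--         for suffix in ALT_VARIANT_SUFFIXES:
--             if parent_ref.endswith(suffix):
--                 parent_ref = parent_ref[: -len(suffix)]
--                 trimmed = True
--                 break
--     if "::table_fill_category::" in parent_ref:
--         parent_ref = parent_ref.split("::table_fill_category::", 1)[0]
--     else:
--         for suffix in DERIVED_CONCEPT_SUFFIXES:
--             if parent_ref.endswith(suffix):
--                 parent_ref = parent_ref[: -len(suffix)]
--                 break
--     return parent_ref
-- ===== SOURCE B (Python) =====
-- _ALT_TOKENS = frozenset(("alt1", "alt2", "alt3", "alt4", "alt5", "alt6", "alt7", "alt8"))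
-- _DERIVED_TOKENS = frozenset(("number_choice", "ordering_choice", "table_fill_yes_no"))
--
--
-- def concept_parent_ref(source_ref: str) -> str:
--     tokens = source_ref.rsplit("::")
--     while len(tokens) > 1 and tokens[-1] in _ALT_TOKENS:
--         tokens.pop()
--     base = "::".join(tokens)
--     head, sep, _tail = base.partition("::table_fill_category::")
--     if sep:
--         return head
--     if len(tokens) > 1 and tokens[-1] in _DERIVED_TOKENS:
--         return "::".join(tokens[:-1])
--     return base
-- ===== Notes on version B (the rewrite author's own statement) =====
-- stated objective: idiomatic
-- what changed: A's repeated endswith-and-truncate while loop over eight alt suffixes and its endswith chain over derived suffixes are replaced by tokenizing once with rsplit on the double-colon separator into a token list, popping trailing alt tokens off that list, rejoining, and testing/dropping the last token for the derived suffixes; the substring-membership-plus-split becomes one partition call.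
import Mathlib
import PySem

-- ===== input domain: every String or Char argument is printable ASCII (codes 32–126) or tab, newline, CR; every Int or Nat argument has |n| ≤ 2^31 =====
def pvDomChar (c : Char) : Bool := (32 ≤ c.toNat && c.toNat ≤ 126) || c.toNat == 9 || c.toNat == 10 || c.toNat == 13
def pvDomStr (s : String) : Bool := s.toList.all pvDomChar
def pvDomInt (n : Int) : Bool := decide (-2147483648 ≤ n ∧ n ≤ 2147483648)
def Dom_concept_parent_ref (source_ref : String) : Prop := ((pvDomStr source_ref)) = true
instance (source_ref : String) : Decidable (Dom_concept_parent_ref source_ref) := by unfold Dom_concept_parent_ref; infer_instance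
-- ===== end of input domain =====

-- B tokenizes once with rsplit on the double-colon separator into a token list, pops trailing alt tokens, rejoins,
-- and tests/drops the last token for derived suffixes, instead of A's repeated
-- endswith-and-truncate loops (objective: idiomatic; equal return values proved below).

-- ===== PORT A =====
def pvAltSuffixes : List (List Char) :=
  ["::alt1".toList, "::alt2".toList, "::alt3".toList, "::alt4".toList,
   "::alt5".toList, "::alt6".toList, "::alt7".toList, "::alt8".toList]

def pvDerivedSuffixes : List (List Char) :=
  ["::number_choice".toList, "::ordering_choice".toList, "::table_fill_yes_no".toList]

def pvCatSep : List Char := "::table_fill_category::".toList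

-- A's 'while trimmed' loop; the inner for-with-break picks the FIRST matching suffix (List.find?)
def pvA_altLoop (p : List Char) : List Char :=
  match h : pvAltSuffixes.find? (fun suf => PySem.Chars.endswith p suf) with
  | some suf => pvA_altLoop (PySem.List.slice p none (some (-(suf.length : Int))))
  | none => p
termination_by p.length
decreasing_by
  have hm := List.mem_of_find?_eq_some h
  have he := List.find?_some h
  have hlen : suf.length = 6 := by fin_cases hm <;> rfl
  have hsuf : suf <:+ p := by
    simpa [PySem.Chars.endswith, List.isSuffixOf_iff_suffix] using he
  have h6 : 6 ≤ p.length := hlen ▸ hsuf.length_le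
  rw [hlen, PySem.List.slice_to_neg_natCast p 6 (by norm_num)]
  simp only [List.length_take]
  omega

def concept_parent_ref (source_ref : String) : String :=
  let p1 := pvA_altLoop source_ref.toList
  let p2 :=
    if PySem.Chars.isIn pvCatSep p1 then
      -- p.split(sep, 1)[0]: a split with a nonempty separator is never empty, so [0] cannot raise
      match PySem.List.pyGet? (PySem.Chars.splitOnMax p1 pvCatSep 1) 0 with
      | some v => v
      | none => []
    else
      match pvDerivedSuffixes.find? (fun suf => PySem.Chars.endswith p1 suf) with
      | some suf => PySem.List.slice p1 none (some (-(suf.length : Int)))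
      | none => p1
  String.ofList p2

-- ===== PORT B =====
def pvAltTokens : List (List Char) :=
  ["alt1".toList, "alt2".toList, "alt3".toList, "alt4".toList,
   "alt5".toList, "alt6".toList, "alt7".toList, "alt8".toList]

def pvDerivedTokens : List (List Char) :=
  ["number_choice".toList, "ordering_choice".toList, "table_fill_yes_no".toList]

def pvSepB : List Char := [':', ':']
def pvBCat : List Char := "::table_fill_category::".toList

-- hand port of str.rsplit on the double-colon separator (no PySem primitive): Python repeatedly
-- splits off the part after the RIGHTMOST separator; equivalently one left-to-right scan of the
-- REVERSED characters, taking the first separator window seen (exact for this fixed separator;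
-- cur rebuilds each token in source order)
def pvRsplitGo : List Char → List Char → List (List Char) → List (List Char)
  | [], cur, acc => cur :: acc
  | [c], cur, acc => (c :: cur) :: acc
  | c :: d :: rest, cur, acc =>
      if c = ':' ∧ d = ':' then pvRsplitGo rest [] (cur :: acc)
      else pvRsplitGo (d :: rest) (c :: cur) acc

def pvRsplit (s : List Char) : List (List Char) := pvRsplitGo s.reverse [] []

-- the while-condition: len(tokens) > 1 and tokens[-1] in _ALT_TOKENS
def pvPopCond (tks : List (List Char)) : Bool :=
  decide (1 < tks.length) &&
    (match PySem.List.pyGet? tks (-1) with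
     | some t => decide (t ∈ pvAltTokens)
     | none => false)

-- the while loop: tokens.pop() is dropLast
def pvPop (tks : List (List Char)) : List (List Char) :=
  if h : pvPopCond tks = true then pvPop tks.dropLast else tks
termination_by tks.length
decreasing_by
  have h1 : 1 < tks.length := by
    unfold pvPopCond at h
    exact of_decide_eq_true ((Bool.and_eq_true _ _).mp h).1
  simp only [List.length_dropLast]
  omega

-- len(tokens) > 1 and tokens[-1] in _DERIVED_TOKENS
def pvDerCond (tks : List (List Char)) : Bool :=
  decide (1 < tks.length) &&
    (match PySem.List.pyGet? tks (-1) with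
     | some t => decide (t ∈ pvDerivedTokens)
     | none => false)

def concept_parent_ref_alt (source_ref : String) : String :=
  let tokens := pvPop (pvRsplit source_ref.toList)
  let base := PySem.Chars.join pvSepB tokens
  -- base.partition(cat): the separator is found iff find ≠ -1, and then head = base[:find]
  let i := PySem.Chars.find base pvBCat
  if i ≠ -1 then
    String.ofList (PySem.List.slice base none (some i))
  else if pvDerCond tokens then
    String.ofList (PySem.Chars.join pvSepB tokens.dropLast)   -- join(tokens[:-1]) with the separator
  else
    String.ofList base

-- ===== PRECONDITION & SPEC =====
def Spec_concept_parent_ref (source_ref : String) (out : String) : Prop := out = concept_parent_ref_alt source_ref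
instance (source_ref : String) (out : String) : Decidable (Spec_concept_parent_ref source_ref out) := by unfold Spec_concept_parent_ref; infer_instance

-- ===== CLAIM (what is proved, stated in full; the proofs are below) =====
def Claim_equal_concept_parent_ref : Prop := ∀ (source_ref : String), Dom_concept_parent_ref source_ref → Spec_concept_parent_ref source_ref (concept_parent_ref source_ref)

-- ===== LEMMAS AND PROOFS =====

theorem pvRsplitGo_ne_nil (l cur : List Char) (acc : List (List Char)) :
    pvRsplitGo l cur acc ≠ [] := by
  induction l, cur, acc using pvRsplitGo.induct with
  | case1 cur acc => simp [pvRsplitGo]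
  | case2 c cur acc => simp [pvRsplitGo]
  | case3 c d rest cur acc h ih => rw [pvRsplitGo, if_pos h]; exact ih
  | case4 c d rest cur acc h ih => rw [pvRsplitGo, if_neg h]; exact ih

theorem pvRsplitGo_acc (l cur : List Char) (acc : List (List Char)) :
    pvRsplitGo l cur acc = pvRsplitGo l cur [] ++ acc := by
  match l with
  | [] => simp [pvRsplitGo]
  | [c] => simp [pvRsplitGo]
  | c :: d :: rest =>
    by_cases h : c = ':' ∧ d = ':'
    · rw [pvRsplitGo, if_pos h, pvRsplitGo, if_pos h,
        pvRsplitGo_acc rest [] (cur :: acc), pvRsplitGo_acc rest [] [cur]]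
      simp
    · rw [pvRsplitGo, if_neg h, pvRsplitGo, if_neg h]
      exact pvRsplitGo_acc (d :: rest) (c :: cur) acc
termination_by l.length

-- a colon-free block of characters is scanned into the current token without splitting
theorem pvRsplitGo_skip (u : List Char) (hu : ':' ∉ u) (R cur : List Char)
    (acc : List (List Char)) :
    pvRsplitGo (u ++ ':' :: ':' :: R) cur acc = pvRsplitGo R [] ((u.reverse ++ cur) :: acc) := by
  induction u generalizing cur with
  | nil => rw [List.nil_append, pvRsplitGo, if_pos ⟨rfl, rfl⟩]; simp
  | cons a u' ih =>
    have ha : a ≠ ':' := fun h => hu (h ▸ List.mem_cons_self)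
    have hu' : ':' ∉ u' := fun h => hu (List.mem_cons_of_mem _ h)
    cases u' with
    | nil =>
      rw [show ([a] ++ ':' :: ':' :: R : List Char) = a :: ':' :: (':' :: R) from rfl,
        pvRsplitGo, if_neg (by tauto)]
      have h2 := ih hu' (a :: cur)
      simp only [List.nil_append] at h2
      rw [h2]
      simp
    | cons b u'' =>
      rw [show ((a :: b :: u'') ++ ':' :: ':' :: R : List Char)
            = a :: b :: (u'' ++ ':' :: ':' :: R) from by simp]
      have hb : b ≠ ':' := fun h => hu' (h ▸ List.mem_cons_self)
      rw [pvRsplitGo, if_neg (by tauto)]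
      have h2 := ih hu' (a :: cur)
      simp only [List.cons_append] at h2 ⊢
      rw [h2]
      simp

-- appending "::" + a colon-free token appends one token to the rsplit
theorem pvRsplit_append (r t : List Char) (ht : ':' ∉ t) :
    pvRsplit (r ++ ':' :: ':' :: t) = pvRsplit r ++ [t] := by
  unfold pvRsplit
  have hrev : (r ++ ':' :: ':' :: t).reverse = t.reverse ++ ':' :: ':' :: r.reverse := by
    simp
  rw [hrev, pvRsplitGo_skip t.reverse (by simpa using ht) r.reverse [] [],
    pvRsplitGo_acc r.reverse [] [t.reverse.reverse ++ []]]
  simp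

theorem pv_join_head (S x y : List Char) (acc : List (List Char)) :
    PySem.Chars.join S ((x ++ y) :: acc) = x ++ PySem.Chars.join S (y :: acc) := by
  cases acc with
  | nil => rw [PySem.Chars.join_singleton, PySem.Chars.join_singleton]
  | cons a l =>
    rw [PySem.Chars.join_cons_cons, PySem.Chars.join_cons_cons]
    simp

theorem pv_join_go (l cur : List Char) (acc : List (List Char)) :
    PySem.Chars.join pvSepB (pvRsplitGo l cur acc)
      = PySem.Chars.join pvSepB ((l.reverse ++ cur) :: acc) := by
  match l with
  | [] => simp [pvRsplitGo]
  | [c] => simp [pvRsplitGo]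
  | c :: d :: rest =>
    by_cases h : c = ':' ∧ d = ':'
    · obtain ⟨rfl, rfl⟩ := h
      rw [pvRsplitGo, if_pos ⟨rfl, rfl⟩, pv_join_go rest [] (cur :: acc),
        PySem.Chars.join_cons_cons,
        show ((':' :: ':' :: rest).reverse ++ cur : List Char)
          = (rest.reverse ++ [':', ':']) ++ cur from by simp,
        List.append_assoc, pv_join_head]
      simp [pvSepB]
    · rw [pvRsplitGo, if_neg h, pv_join_go (d :: rest) (c :: cur) acc]
      simp
termination_by l.length

theorem pv_join_rsplit (s : List Char) : PySem.Chars.join pvSepB (pvRsplit s) = s := by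
  unfold pvRsplit
  rw [pv_join_go]
  simp [PySem.Chars.join_singleton]

theorem pv_join_concat (tks : List (List Char)) (t : List Char) (h : tks ≠ []) :
    PySem.Chars.join pvSepB (tks ++ [t])
      = PySem.Chars.join pvSepB tks ++ ':' :: ':' :: t := by
  induction tks with
  | nil => exact absurd rfl h
  | cons a l ih =>
    cases l with
    | nil =>
      rw [show ([a] ++ [t] : List (List Char)) = a :: t :: [] from rfl,
        PySem.Chars.join_cons_cons, PySem.Chars.join_singleton, PySem.Chars.join_singleton]
      simp [pvSepB]
    | cons b l' =>
      rw [show ((a :: b :: l') ++ [t] : List (List Char)) = a :: ((b :: l') ++ [t]) from rfl]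
      rw [show (a :: ((b :: l') ++ [t]) : List (List Char)) = a :: (b :: (l' ++ [t])) from rfl]
      rw [PySem.Chars.join_cons_cons, PySem.Chars.join_cons_cons]
      rw [show (b :: (l' ++ [t]) : List (List Char)) = (b :: l') ++ [t] from rfl,
        ih (by simp)]
      simp

theorem pv_pyGet_last {α : Type} (l : List α) (a : α) :
    PySem.List.pyGet? (l ++ [a]) (-1) = some a := by
  simp [PySem.List.pyGet?, PySem.List.pyIdx?]

theorem pv_last_decomp {α : Type} (l : List α) (h : 1 < l.length) :
    ∃ init a, l = init ++ [a] ∧ init ≠ [] ∧ PySem.List.pyGet? l (-1) = some a := by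
  have hne : l ≠ [] := by intro h0; subst h0; simp at h
  refine ⟨l.dropLast, l.getLast hne, (List.dropLast_append_getLast hne).symm, ?_, ?_⟩
  · intro h0
    have := congrArg List.length h0
    simp [List.length_dropLast] at this
    omega
  · conv_lhs => rw [← List.dropLast_append_getLast hne]
    exact pv_pyGet_last _ _

-- correspondence between A's suffix constants and B's token constants
theorem pv_alt_cases (suf : List Char) (h : suf ∈ pvAltSuffixes) :
    ∃ t, t ∈ pvAltTokens ∧ suf = ':' :: ':' :: t ∧ ':' ∉ t := by
  fin_cases h
  · exact ⟨"alt1".toList, by decide, by decide, by decide⟩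
  · exact ⟨"alt2".toList, by decide, by decide, by decide⟩
  · exact ⟨"alt3".toList, by decide, by decide, by decide⟩
  · exact ⟨"alt4".toList, by decide, by decide, by decide⟩
  · exact ⟨"alt5".toList, by decide, by decide, by decide⟩
  · exact ⟨"alt6".toList, by decide, by decide, by decide⟩
  · exact ⟨"alt7".toList, by decide, by decide, by decide⟩
  · exact ⟨"alt8".toList, by decide, by decide, by decide⟩

theorem pv_alt_token_cases (t : List Char) (h : t ∈ pvAltTokens) :
    ':' ∉ t ∧ ':' :: ':' :: t ∈ pvAltSuffixes := by
  fin_cases h <;> exact ⟨by decide, by decide⟩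

theorem pv_der_cases (suf : List Char) (h : suf ∈ pvDerivedSuffixes) :
    ∃ t, t ∈ pvDerivedTokens ∧ suf = ':' :: ':' :: t ∧ ':' ∉ t := by
  fin_cases h
  · exact ⟨"number_choice".toList, by decide, by decide, by decide⟩
  · exact ⟨"ordering_choice".toList, by decide, by decide, by decide⟩
  · exact ⟨"table_fill_yes_no".toList, by decide, by decide, by decide⟩

theorem pv_der_token_cases (t : List Char) (h : t ∈ pvDerivedTokens) :
    ':' ∉ t ∧ ':' :: ':' :: t ∈ pvDerivedSuffixes := by
  fin_cases h <;> exact ⟨by decide, by decide⟩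

theorem pv_lhs_of_decomp (b pre suf : List Char) (hlen : 0 < suf.length) (hb : b = pre ++ suf) :
    PySem.List.slice b none (some (-(suf.length : Int))) = pre := by
  rw [PySem.List.slice_to_neg_natCast b suf.length hlen]
  subst hb
  rw [show (pre ++ suf).length - suf.length = pre.length from by simp]
  exact List.take_left

-- A's stripping loop and B's token-pop loop compute rsplits of the same string
theorem pv_pop_rsplit (s : List Char) : pvPop (pvRsplit s) = pvRsplit (pvA_altLoop s) := by
  induction s using pvA_altLoop.induct with
  | case1 p suf hfind ih =>
    have hm := List.mem_of_find?_eq_some hfind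
    have he := List.find?_some hfind
    obtain ⟨t, htm, hsufeq, htc⟩ := pv_alt_cases suf hm
    have hsuf : suf <:+ p := by
      simpa [PySem.Chars.endswith, List.isSuffixOf_iff_suffix] using he
    obtain ⟨r, hp⟩ := hsuf
    have hslice : PySem.List.slice p none (some (-((suf.length : Int)))) = r :=
      pv_lhs_of_decomp p r suf (by rw [hsufeq]; simp) hp.symm
    have hAeq : pvA_altLoop p = pvA_altLoop r := by
      rw [pvA_altLoop, hfind]
      exact congrArg pvA_altLoop hslice
    rw [hAeq, ← hp, hsufeq]
    rw [hslice] at ih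
    rw [pvRsplit_append r t htc]
    rw [pvPop]
    have hcond : pvPopCond (pvRsplit r ++ [t]) = true := by
      unfold pvPopCond
      rw [pv_pyGet_last]
      have h0 : 0 < (pvRsplit r).length :=
        List.length_pos_iff.mpr (pvRsplitGo_ne_nil r.reverse [] [])
      have hlen : 1 < (pvRsplit r ++ [t]).length := by
        rw [List.length_append]
        simp
        omega
      simp only [Bool.and_eq_true, decide_eq_true_eq]
      exact ⟨hlen, htm⟩
    rw [dif_pos hcond, List.dropLast_concat]
    exact ih
  | case2 p hfind =>
    have hAeq : pvA_altLoop p = p := by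
      rw [pvA_altLoop, hfind]
    rw [hAeq, pvPop]
    have hcond : pvPopCond (pvRsplit p) ≠ true := by
      intro hc
      unfold pvPopCond at hc
      rw [Bool.and_eq_true] at hc
      obtain ⟨h1, h2⟩ := hc
      obtain ⟨init, a, hdec, hinit, hget⟩ :=
        pv_last_decomp (pvRsplit p) (of_decide_eq_true h1)
      rw [hget] at h2
      have ha : a ∈ pvAltTokens := of_decide_eq_true h2
      obtain ⟨hac, hsm⟩ := pv_alt_token_cases a ha
      have hp : p = PySem.Chars.join pvSepB init ++ ':' :: ':' :: a := by
        conv_lhs => rw [← pv_join_rsplit p]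
        rw [hdec, pv_join_concat init a hinit]
      have hend : PySem.Chars.endswith p (':' :: ':' :: a) = true := by
        rw [PySem.Chars.endswith_iff]
        exact ⟨PySem.Chars.join pvSepB init, hp.symm⟩
      have : (pvAltSuffixes.find? (fun suf => PySem.Chars.endswith p suf)).isSome :=
        List.find?_isSome.mpr ⟨_, hsm, hend⟩
      rw [hfind] at this
      simp at this
    rw [dif_neg hcond]

-- head of split(sep, 1) is the prefix before the first occurrence
theorem pv_go_m0 (sep : List Char) (fuel : Nat) (l cur acc : List Char) (accs : List (List Char)) :
    PySem.Chars.splitOnMax.go sep fuel 0 l (cur) (acc :: accs) =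
      (acc :: accs).reverse ++ [cur.reverse ++ l] := by
  cases fuel <;> cases l <;> simp [PySem.Chars.splitOnMax.go]

theorem pv_go_head (sep : List Char) (hsep : sep ≠ []) :
    ∀ (l : List Char) (n fuel : Nat) (cur : List Char) (accs : List (List Char)),
      l.length < fuel → n ≤ l.length → sep.isPrefixOf (l.drop n) = true →
      (∀ i < n, sep.isPrefixOf (l.drop i) = false) →
      ∃ rest, PySem.Chars.splitOnMax.go sep fuel 1 l cur accs =
        accs.reverse ++ (cur.reverse ++ l.take n) :: rest := by
  intro l
  induction l with
  | nil =>
      intro n fuel cur accs _ hn hp _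
      obtain rfl : n = 0 := by simpa using hn
      simp only [List.drop_nil] at hp
      rw [List.isPrefixOf_iff_prefix] at hp
      exact absurd (List.prefix_nil.mp hp) hsep
  | cons c rest ihl =>
      intro n fuel cur accs hfuel hn hp hmax
      obtain ⟨f, rfl⟩ : ∃ f, fuel = f + 1 := ⟨fuel - 1, by omega⟩
      by_cases hpre : sep.isPrefixOf (c :: rest) = true
      · have hn0 : n = 0 := by
          by_contra h0
          have := hmax 0 (by omega)
          rw [List.drop_zero] at this
          rw [this] at hpre
          exact Bool.false_ne_true hpre
        subst hn0
        rw [show PySem.Chars.splitOnMax.go sep (f + 1) 1 (c :: rest) cur accs =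
          PySem.Chars.splitOnMax.go sep f 0 (List.drop sep.length (c :: rest)) []
            (cur.reverse :: accs) from by
          simp [PySem.Chars.splitOnMax.go, hpre]]
        rw [pv_go_m0]
        exact ⟨[List.drop sep.length (c :: rest)], by simp⟩
      · obtain ⟨n', rfl⟩ : ∃ n', n = n' + 1 := by
          refine ⟨n - 1, ?_⟩
          rcases Nat.eq_zero_or_pos n with h0 | h0
          · subst h0; rw [List.drop_zero] at hp; exact absurd hp hpre
          · omega
        have hstep : PySem.Chars.splitOnMax.go sep (f + 1) 1 (c :: rest) cur accs =
            PySem.Chars.splitOnMax.go sep f 1 rest (c :: cur) accs := by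
          simp [PySem.Chars.splitOnMax.go, hpre]
        obtain ⟨r, hr⟩ := ihl n' f (c :: cur) accs (by simpa using hfuel)
          (by simpa using hn) (by simpa using hp)
          (fun i hi => by simpa using hmax (i + 1) (by omega))
        refine ⟨r, ?_⟩
        rw [hstep, hr]
        simp

theorem pv_split_head (b sep : List Char) (hsep : sep ≠ []) (hocc : PySem.Chars.isIn sep b = true) :
    PySem.List.pyGet? (PySem.Chars.splitOnMax b sep 1) 0 =
      some (b.take (PySem.Chars.find b sep).toNat) := by
  have hinf : sep <:+: b := (PySem.Chars.isIn_iff_infix sep b).mp hocc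
  have hnn : 0 ≤ PySem.Chars.find b sep := (PySem.Chars.find_nonneg_iff b sep).mpr hinf
  obtain ⟨hpfx, hmin⟩ := PySem.Chars.find_spec (s := b) (sub := sep) hnn
  have hle : (PySem.Chars.find b sep).toNat ≤ b.length := by
    have := PySem.Chars.find_le_length b sep
    omega
  have hsm : PySem.Chars.splitOnMax b sep 1 =
      PySem.Chars.splitOnMax.go sep (b.length + 1) 1 b [] [] := by
    simp [PySem.Chars.splitOnMax]
  obtain ⟨rest, hr⟩ := pv_go_head sep hsep b (PySem.Chars.find b sep).toNat (b.length + 1) [] []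
    (by omega) hle (List.isPrefixOf_iff_prefix.mpr hpfx)
    (fun i hi => by
      rw [← Bool.not_eq_true, List.isPrefixOf_iff_prefix]
      exact hmin i hi)
  rw [hsm, hr]
  simp [PySem.List.pyGet?, PySem.List.pyIdx?]

-- the derived-suffix tail: A's endswith chain vs B's last-token test, on the same string
theorem pv_tail_eq (b : List Char) (hb : b = PySem.Chars.join pvSepB (pvRsplit b)) :
    (match pvDerivedSuffixes.find? (fun suf => PySem.Chars.endswith b suf) with
     | some suf => PySem.List.slice b none (some (-(suf.length : Int)))
     | none => b) =
    (if pvDerCond (pvRsplit b) then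
       PySem.Chars.join pvSepB (pvRsplit b).dropLast
     else b) := by
  cases hA : pvDerivedSuffixes.find? (fun suf => PySem.Chars.endswith b suf) with
  | some suf =>
      have hm := List.mem_of_find?_eq_some hA
      have he := List.find?_some hA
      obtain ⟨t, htm, rfl, htc⟩ := pv_der_cases suf hm
      have hsuf : (':' :: ':' :: t) <:+ b := by
        simpa [PySem.Chars.endswith, List.isSuffixOf_iff_suffix] using he
      obtain ⟨r, rfl⟩ := hsuf
      rw [pvRsplit_append r t htc]
      have hcond : pvDerCond (pvRsplit r ++ [t]) = true := by
        unfold pvDerCond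
        rw [pv_pyGet_last]
        have h0 : 0 < (pvRsplit r).length :=
          List.length_pos_iff.mpr (pvRsplitGo_ne_nil r.reverse [] [])
        have hlen : 1 < (pvRsplit r ++ [t]).length := by
          rw [List.length_append]
          simp
          omega
        simp only [Bool.and_eq_true, decide_eq_true_eq]
        exact ⟨hlen, htm⟩
      rw [if_pos hcond, List.dropLast_concat]
      have hjr : PySem.Chars.join pvSepB (pvRsplit r) = r := pv_join_rsplit r
      rw [hjr]
      exact pv_lhs_of_decomp _ r _ (by simp) rfl
  | none =>
      have hnone := List.find?_eq_none.mp hA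
      have hcond : pvDerCond (pvRsplit b) ≠ true := by
        intro hc
        unfold pvDerCond at hc
        rw [Bool.and_eq_true] at hc
        obtain ⟨h1, h2⟩ := hc
        obtain ⟨init, a, hdec, hinit, hget⟩ :=
          pv_last_decomp (pvRsplit b) (of_decide_eq_true h1)
        rw [hget] at h2
        have ha : a ∈ pvDerivedTokens := of_decide_eq_true h2
        obtain ⟨hac, hsm⟩ := pv_der_token_cases a ha
        have hbdec : b = PySem.Chars.join pvSepB init ++ ':' :: ':' :: a := by
          conv_lhs => rw [hb]
          rw [hdec, pv_join_concat init a hinit]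
        have hend : PySem.Chars.endswith b (':' :: ':' :: a) = true := by
          rw [PySem.Chars.endswith_iff]
          exact ⟨PySem.Chars.join pvSepB init, hbdec.symm⟩
        exact hnone _ hsm hend
      rw [if_neg hcond]

-- ===== VERDICT (by name: the statement is the Claim_ definition above) =====
theorem concept_parent_ref_spec : Claim_equal_concept_parent_ref := by
  intro s _
  unfold Spec_concept_parent_ref concept_parent_ref concept_parent_ref_alt
  simp only []
  rw [pv_pop_rsplit]
  set p1 := pvA_altLoop s.toList with hp1
  have hbase : PySem.Chars.join pvSepB (pvRsplit p1) = p1 := pv_join_rsplit p1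
  rw [hbase]
  rw [show pvBCat = pvCatSep from rfl]
  by_cases hc : PySem.Chars.find p1 pvCatSep ≠ -1
  · have hisin : PySem.Chars.isIn pvCatSep p1 = true := by
      rw [PySem.Chars.isIn_iff_infix]
      exact (PySem.Chars.find_ne_neg_one_iff p1 pvCatSep).mp hc
    rw [if_pos hisin, if_pos hc]
    rw [pv_split_head p1 pvCatSep (by decide) hisin]
    have h0 : (0 : Int) ≤ PySem.Chars.find p1 pvCatSep :=
      (PySem.Chars.find_nonneg_iff p1 pvCatSep).mpr
        ((PySem.Chars.isIn_iff_infix pvCatSep p1).mp hisin)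
    rw [PySem.List.slice_to p1 h0]
  · have hisin : PySem.Chars.isIn pvCatSep p1 ≠ true := by
      simp only [ne_eq, not_not] at hc
      rw [Ne, PySem.Chars.isIn_iff_infix]
      exact (PySem.Chars.find_eq_neg_one_iff p1 pvCatSep).mp hc
    rw [if_neg hisin, if_neg hc]
    have := pv_tail_eq p1 hbase.symm
    rw [← apply_ite String.ofList]
    exact congrArg String.ofList this
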